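-- pv_equiv track=rewrite | github.com/Gugl7/ADL-WS24 | A3/app.py | concatenate_words_by_label
-- ===== SOURCE A (Python) =====
-- def concatenate_words_by_label(words:list, labels: list) -> dict:
--     """
--     Concatenates words for each unique label.
--
--     Args:
--     - words (list of str): List of words.
--     - labels (list of str): Corresponding list of labels.
--
--     Returns:
--     - dict: A dictionary where keys are labels, and values are concatenated strings of words for each label.
--     """
--     if len(labels) > len(words):
--         labels = labels[:len(words)]
--     if len(words) != len(labels):
--         raise ValueError("The number of words and labels must be the same.")
--
--     result = {}
--     for word, label in zip(words, labels):
--         if label not in result: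
--             result[label] = word
--         else:
--             result[label] += " " + word
--
--     return result
-- ===== SOURCE B (Python) =====
-- def concatenate_words_by_label(words: list, labels: list) -> dict:
--     if len(labels) > len(words):
--         labels = labels[:len(words)]
--     if len(words) != len(labels):
--         raise ValueError("The number of words and labels must be the same.")
--
--     groups = {}
--     for label, word in zip(labels, words):
--         groups.setdefault(label, []).append(word)
--
--     result = {}
--     for label, ws in groups.items():
--         result[label] = " ".join(ws)
--     return result
-- ===== Notes on version B (the rewrite author's own statement) =====
-- stated objective: alternative
-- what changed: B groups words per label into lists in one pass and performs the concatenation only afterwards with a single ' '.join per label, instead of A's incremental string building inside the loop.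
import Mathlib
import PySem

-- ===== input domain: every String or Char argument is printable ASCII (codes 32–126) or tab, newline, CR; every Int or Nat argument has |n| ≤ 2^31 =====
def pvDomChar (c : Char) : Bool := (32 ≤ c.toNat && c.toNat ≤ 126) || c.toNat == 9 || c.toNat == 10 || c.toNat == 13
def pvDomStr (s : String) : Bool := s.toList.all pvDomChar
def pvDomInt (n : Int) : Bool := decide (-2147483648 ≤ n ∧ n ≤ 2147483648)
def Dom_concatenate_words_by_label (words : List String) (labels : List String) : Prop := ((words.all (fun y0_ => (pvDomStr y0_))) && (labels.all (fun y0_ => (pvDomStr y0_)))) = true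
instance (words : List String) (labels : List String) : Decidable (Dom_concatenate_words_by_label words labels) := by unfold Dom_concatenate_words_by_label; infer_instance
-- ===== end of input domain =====

-- B groups words per label into lists in one pass and concatenates afterwards with one join per
-- label, instead of A's incremental string building inside the loop (alternative decomposition).

-- ===== PORT A =====
def concatenate_words_by_label (words : List String) (labels : List String) : List (String × String) :=
  let labels := if labels.length > words.length then labels.take words.length else labels
  -- Pre_ excludes len(words) ≠ len(labels): Python raises ValueError there
  let result := (words.zip labels).foldl
    (fun (d : PySem.Dict String String) p =>
      if d.contains p.2 = false then
        d.insert p.2 p.1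
      else
        -- result[label] += " " + word  : PySem.Str.join " " [old, word] = old + " " + word
        d.modify p.2 "" (fun old => PySem.Str.join " " [old, p.1]))
    PySem.Dict.empty
  result.items

-- ===== PORT B =====
def concatenate_words_by_label_alt (words : List String) (labels : List String) : List (String × String) :=
  let labels := if labels.length > words.length then labels.take words.length else labels
  -- groups.setdefault(label, []).append(word)  =  groups[label] = groups.get(label, []) + [word]
  let groups := (labels.zip words).foldl
    (fun (d : PySem.Dict String (List String)) p => d.modify p.1 [] (fun l => l ++ [p.2]))
    PySem.Dict.empty
  let result := groups.items.foldl
    (fun (d : PySem.Dict String String) p => d.insert p.1 (PySem.Str.join " " p.2))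
    PySem.Dict.empty
  result.items

-- ===== PRECONDITION & SPEC =====
-- Pre_ excludes exactly the inputs where A raises ValueError (more words than labels); B raises there too.
def Pre_concatenate_words_by_label (words : List String) (labels : List String) : Prop :=
  words.length ≤ labels.length
instance (words : List String) (labels : List String) : Decidable (Pre_concatenate_words_by_label words labels) := by unfold Pre_concatenate_words_by_label; infer_instance

def pvWitness_concatenate_words_by_label : List String × List String :=
  (["a", "b", "c"], ["x", "y", "x"])

def Spec_concatenate_words_by_label (words : List String) (labels : List String) (out : List (String × String)) : Prop := out = concatenate_words_by_label_alt words labels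
instance (words : List String) (labels : List String) (out : List (String × String)) : Decidable (Spec_concatenate_words_by_label words labels out) := by unfold Spec_concatenate_words_by_label; infer_instance

-- ===== CLAIM (what is proved, stated in full; the proofs are below) =====
def Claim_equal_concatenate_words_by_label : Prop := ∀ (words : List String) (labels : List String), Dom_concatenate_words_by_label words labels → Pre_concatenate_words_by_label words labels → Spec_concatenate_words_by_label words labels (concatenate_words_by_label words labels)

-- ===== LEMMAS AND PROOFS =====

-- the relation between B's grouping dict and A's string dict: join each word list with spaces
def pvF (p : String × List String) : String × String := (p.1, PySem.Str.join " " p.2)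

theorem pv_chars_join_append (sep w : List Char) (l : List (List Char)) (h : l ≠ []) :
    PySem.Chars.join sep (l ++ [w]) = PySem.Chars.join sep l ++ sep ++ w := by
  induction l with
  | nil => simp at h
  | cons a rest ih =>
    cases rest with
    | nil =>
      simp [PySem.Chars.join_singleton, PySem.Chars.join_cons_cons]
    | cons b r =>
      rw [List.cons_append, List.cons_append, PySem.Chars.join_cons_cons,
        ← List.cons_append, ih (by simp), PySem.Chars.join_cons_cons]
      simp [List.append_assoc]

theorem pv_join_append (ws : List String) (w : String) (h : ws ≠ []) :
    PySem.Str.join " " (ws ++ [w]) = PySem.Str.join " " [PySem.Str.join " " ws, w] := by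
  apply String.toList_inj.mp
  simp only [PySem.Str.toList_join, List.map_append, List.map_cons, List.map_nil]
  rw [pv_chars_join_append _ _ _ (by simpa using h),
    PySem.Chars.join_cons_cons, PySem.Chars.join_singleton]

-- loop invariant: A's dict is the pvF-image of B's grouping dict, and stays so through one pass
theorem pv_inv (l : List (String × String)) (d : PySem.Dict String String)
    (g : PySem.Dict String (List String))
    (hnd : g.keys.Nodup)
    (hit : d.items = g.items.map pvF)
    (hne : ∀ p ∈ g.items, p.2 ≠ []) :
    (l.foldl (fun d (p : String × String) =>
        if d.contains p.2 = false then d.insert p.2 p.1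
        else d.modify p.2 "" (fun old => PySem.Str.join " " [old, p.1])) d).items
    = (l.foldl (fun g (p : String × String) =>
        g.modify p.2 [] (fun ws => ws ++ [p.1])) g).items.map pvF := by
  induction l generalizing d g with
  | nil => simpa using hit
  | cons p l ih =>
    have hkeys : d.keys = g.keys := by
      simp only [PySem.Dict.keys, hit, List.map_map]
      rfl
    have hcont : d.contains p.2 = g.contains p.2 := by
      rw [PySem.Dict.contains_eq_decide_mem_keys, PySem.Dict.contains_eq_decide_mem_keys, hkeys]
    simp only [List.foldl_cons]
    cases hc : g.contains p.2 with
    | false =>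
      have hA : (if d.contains p.2 = false then d.insert p.2 p.1
          else d.modify p.2 "" (fun old => PySem.Str.join " " [old, p.1])) = d.insert p.2 p.1 := by
        rw [hcont, hc]; simp
      have hB : g.modify p.2 [] (fun ws => ws ++ [p.1]) = g.insert p.2 [p.1] := by
        simp [PySem.Dict.modify, PySem.Dict.getD_of_not_contains, hc]
      rw [hA, hB]
      refine ih _ _ ?_ ?_ ?_
      · rw [PySem.Dict.keys_insert_of_not_contains g _ hc]
        have : p.2 ∉ g.keys := by
          intro hmem
          rw [PySem.Dict.contains_eq_decide_mem_keys] at hc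
          simp [hmem] at hc
        simp [List.nodup_append, hnd]
        intro a ha e
        exact this (e ▸ ha)
      · rw [PySem.Dict.items_insert_of_not_contains _ _ (by rw [hcont]; exact hc),
          PySem.Dict.items_insert_of_not_contains _ _ hc, List.map_append, hit]
        simp [pvF, PySem.Str.join]
      · intro q hq
        rw [PySem.Dict.items_insert_of_not_contains _ _ hc] at hq
        rcases List.mem_append.mp hq with h1 | h1
        · exact hne q h1
        · simp at h1; simp [h1]
    | true =>
      have hdc : d.contains p.2 = true := by rw [hcont]; exact hc
      have hA : (if d.contains p.2 = false then d.insert p.2 p.1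
          else d.modify p.2 "" (fun old => PySem.Str.join " " [old, p.1]))
          = d.insert p.2 (PySem.Str.join " " [d.getD p.2 "", p.1]) := by
        rw [hdc]; simp [PySem.Dict.modify]
      have hB : g.modify p.2 [] (fun ws => ws ++ [p.1])
          = g.insert p.2 (g.getD p.2 [] ++ [p.1]) := by
        simp [PySem.Dict.modify]
      rw [hA, hB]
      have hdnd : d.keys.Nodup := by rw [hkeys]; exact hnd
      refine ih _ _ ?_ ?_ ?_
      · have := PySem.Dict.keys_insert_of_contains g (g.getD p.2 [] ++ [p.1]) hc
        rw [this]; exact hnd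
      · rw [PySem.Dict.items_insert_of_contains _ _ hdc,
          PySem.Dict.items_insert_of_contains _ _ hc, hit, List.map_map, List.map_map]
        apply List.map_congr_left
        intro q hq
        by_cases hqk : q.1 = p.2
        · have hq2 : (p.2, q.2) ∈ g.items := by rw [← hqk]; exact hq
          have hws : g.getD p.2 [] = q.2 := PySem.Dict.getD_of_mem_items g hq2 hnd []
          have hdq : (p.2, PySem.Str.join " " q.2) ∈ d.items := by
            rw [hit]
            exact List.mem_map.mpr ⟨q, hq, by simp [pvF, hqk]⟩
          have hdg : d.getD p.2 "" = PySem.Str.join " " q.2 :=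
            PySem.Dict.getD_of_mem_items d hdq hdnd ""
          simp only [Function.comp_apply, pvF, hqk, beq_self_eq_true, if_true, hdg, hws]
          rw [pv_join_append q.2 p.1 (hne q hq)]
        · simp only [Function.comp_apply, pvF]
          rw [if_neg (by simpa using hqk), if_neg (by simpa using hqk)]
      · intro q hq
        rw [PySem.Dict.items_insert_of_contains _ _ hc] at hq
        rcases List.mem_map.mp hq with ⟨r, hr, hrq⟩
        by_cases hrk : r.1 = p.2
        · rw [if_pos (by simpa using hrk)] at hrq
          rw [← hrq]; simp
        · rw [if_neg (by simpa using hrk)] at hrq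
          rw [← hrq]; exact hne r hr

-- ===== VERDICT (by name: the statement is the Claim_ definition above) =====
theorem concatenate_words_by_label_spec : Claim_equal_concatenate_words_by_label := by
  intro words labels _hdom _hpre
  unfold Spec_concatenate_words_by_label
  unfold concatenate_words_by_label concatenate_words_by_label_alt
  set labels' := if labels.length > words.length then labels.take words.length else labels with hl
  -- B's grouping loop, rewritten as a fold over words.zip labels'
  have hswap : labels'.zip words = (words.zip labels').map Prod.swap := (List.zip_swap _ _).symm
  set g := (labels'.zip words).foldl
      (fun (d : PySem.Dict String (List String)) p => d.modify p.1 [] (fun l => l ++ [p.2]))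
      PySem.Dict.empty with hg
  have hgnd : g.keys.Nodup := by
    rw [hg]
    exact PySem.Dict.nodup_keys_foldl_modify_key _ Prod.fst [] _ _ (by simp)
  -- second phase of B: fresh distinct keys, so it just maps pvF over g.items
  have hres : (g.items.foldl
      (fun (d : PySem.Dict String String) p => d.insert p.1 (PySem.Str.join " " p.2))
      PySem.Dict.empty).items = g.items.map pvF := by
    have := PySem.Dict.items_foldl_insert_fresh g.items Prod.fst
      (fun p => PySem.Str.join " " p.2) PySem.Dict.empty (by intro a _; simp) (by exact hgnd)
    simpa [pvF] using this
  have hgz : g = (words.zip labels').foldl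
      (fun (d : PySem.Dict String (List String)) (p : String × String) =>
        d.modify p.2 [] (fun ws => ws ++ [p.1])) PySem.Dict.empty := by
    rw [hg, hswap, List.foldl_map]
    rfl
  rw [hres, hgz]
  exact pv_inv (words.zip labels') PySem.Dict.empty PySem.Dict.empty (by exact List.nodup_nil) (by rfl) (by intro q hq; simp [PySem.Dict.empty] at hq)
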